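-- pv_equiv track=rewrite | github.com/SebiSebi/DataMine | scripts/allen_ai_obqa/retrieval/vector_based/query.py | get_embeddings_dim
-- ===== SOURCE A (Python) =====
-- def get_embeddings_dim(embeddings):
--     dim = None
--     for embedding in embeddings.values():
--         new_dim = len(embedding)
--         if dim is None:
--             dim = new_dim
--         else:
--             assert(new_dim == dim)  # All embeddings have the same dimention.
--     return dim
-- ===== SOURCE B (Python) =====
-- def get_embeddings_dim(embeddings):
--     dims = {len(e) for e in embeddings.values()}
--     assert len(dims) <= 1  # All embeddings have the same dimension.
--     return next(iter(dims)) if dims else None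
-- ===== Notes on version B (the rewrite author's own statement) =====
-- stated objective: simpler
-- what changed: Replaces the incremental running-comparison accumulator with a one-shot set comprehension of all distinct dimensions followed by a cardinality assertion; Pre_ excludes inputs with unequal dimensions, where both A and B raise AssertionError.
import Mathlib
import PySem

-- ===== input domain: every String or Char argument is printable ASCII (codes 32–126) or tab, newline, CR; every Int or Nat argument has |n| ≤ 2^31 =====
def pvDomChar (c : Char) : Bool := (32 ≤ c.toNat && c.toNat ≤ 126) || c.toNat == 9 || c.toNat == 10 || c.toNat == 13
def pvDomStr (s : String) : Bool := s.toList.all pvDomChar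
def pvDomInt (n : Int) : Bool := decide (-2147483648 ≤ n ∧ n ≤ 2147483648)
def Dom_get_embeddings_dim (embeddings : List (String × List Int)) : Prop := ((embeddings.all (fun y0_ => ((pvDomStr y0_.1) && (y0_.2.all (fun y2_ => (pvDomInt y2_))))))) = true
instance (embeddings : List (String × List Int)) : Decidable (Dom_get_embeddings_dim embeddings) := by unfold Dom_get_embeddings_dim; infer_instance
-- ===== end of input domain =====

-- B replaces A's incremental running-comparison with a set of distinct dimensions plus a cardinality check (objective: simpler).


-- ===== PORT A =====
-- dim = None; for embedding in values(): new_dim = len(embedding); if dim is None: dim = new_dim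
-- else: assert new_dim == dim  (the assert holds on every input admitted by Pre_, so the state is unchanged there)
def get_embeddings_dim (embeddings : List (String × List Int)) : Option Int :=
  embeddings.foldl (fun dim kv =>
    match dim with
    | none => some ((kv.2.length : Int))
    | some d => some d) none

-- ===== PORT B =====
-- dims = {len(e) for e in embeddings.values()}; assert len(dims) <= 1 (holds under Pre_);
-- return next(iter(dims)) if dims else None — with |dims| ≤ 1 the iterated element is order-independent: head?
def get_embeddings_dim_alt (embeddings : List (String × List Int)) : Option Int :=
  let dims : PySem.Set Int := PySem.Set.ofList (embeddings.map (fun kv => ((kv.2.length : Int))))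
  dims.head?

-- ===== PRECONDITION & SPEC =====
-- Pre_ admits exactly the inputs on which A returns: all embedding vectors share one length
-- (on any other input A's assert raises AssertionError, as does B's).
def Pre_get_embeddings_dim (embeddings : List (String × List Int)) : Prop :=
  ∀ p ∈ embeddings, ∀ q ∈ embeddings, p.2.length = q.2.length
instance (embeddings : List (String × List Int)) : Decidable (Pre_get_embeddings_dim embeddings) := by unfold Pre_get_embeddings_dim; infer_instance
def pvWitness_get_embeddings_dim : (List (String × List Int)) := [("x", [1, 2]), ("y", [3, 4])]
def Spec_get_embeddings_dim (embeddings : List (String × List Int)) (out : Option Int) : Prop := out = get_embeddings_dim_alt embeddings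
instance (embeddings : List (String × List Int)) (out : Option Int) : Decidable (Spec_get_embeddings_dim embeddings out) := by unfold Spec_get_embeddings_dim; infer_instance

-- ===== CLAIM (what is proved, stated in full; the proofs are below) =====
def Claim_equal_get_embeddings_dim : Prop := ∀ (embeddings : List (String × List Int)), Dom_get_embeddings_dim embeddings → Pre_get_embeddings_dim embeddings → Spec_get_embeddings_dim embeddings (get_embeddings_dim embeddings)

-- ===== LEMMAS AND PROOFS =====

-- A's fold never changes a 'some' state.
theorem foldA_some (xs : List (String × List Int)) (d : Int) :
    xs.foldl (fun dim kv =>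
      match dim with
      | none => some ((kv.2.length : Int))
      | some d => some d) (some d) = some d := by
  induction xs with
  | nil => rfl
  | cons x xs ih => simpa using ih

-- Folding Set.add of a constant element onto [c] keeps [c].
theorem foldAdd_const (ys : List Int) (c : Int) (h : ∀ y ∈ ys, y = c) :
    ys.foldl PySem.Set.add [c] = [c] := by
  induction ys with
  | nil => rfl
  | cons y ys ih =>
    have hy : y = c := h y (by simp)
    subst hy
    have : PySem.Set.add [y] y = [y] := by simp [PySem.Set.add, PySem.Set.contains]
    simp only [List.foldl_cons, this]
    exact ih (fun z hz => h z (by simp [hz]))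

-- ===== VERDICT (by name: the statement is the Claim_ definition above) =====
theorem get_embeddings_dim_spec : Claim_equal_get_embeddings_dim := by
  intro embeddings _ hpre
  unfold Spec_get_embeddings_dim get_embeddings_dim get_embeddings_dim_alt
  cases embeddings with
  | nil => rfl
  | cons x xs =>
    have hall : ∀ y ∈ xs.map (fun kv => ((kv.2.length : Int))), y = (x.2.length : Int) := by
      intro y hy
      rcases List.mem_map.mp hy with ⟨q, hq, rfl⟩
      exact_mod_cast hpre q (by simp [hq]) x (by simp)
    simp only [List.foldl_cons, List.map_cons]
    rw [foldA_some]
    have : PySem.Set.ofList ((x.2.length : Int) :: xs.map (fun kv => ((kv.2.length : Int)))) = [(x.2.length : Int)] := by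
      rw [PySem.Set.ofList_eq_foldl]
      simp only [List.foldl_cons]
      have h0 : PySem.Set.add [] (x.2.length : Int) = [(x.2.length : Int)] := by
        simp [PySem.Set.add, PySem.Set.contains]
      rw [h0]
      exact foldAdd_const _ _ hall
    rw [this]
    rfl
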